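-- pv_equiv track=rewrite | github.com/goodosuser/starcal | scal2/timeline.py | getYearRangeTickValues
-- ===== SOURCE A (Python) =====
-- def getYearRangeTickValues(y0, y1, minStepYear):
--     data = []
--     numList = []
--     #for n in (1000, 500, 100, 50, 10, 1):
--     for n in (1000, 100, 10, 1):
--         if n<minStepYear:
--             break
--         numList.append(n)
--     for y in range(y0, y1):
--         for n in numList:
--             if y%n == 0:
--                 data.append((n, y))
--                 break
--     return data
-- ===== SOURCE B (Python) =====
-- def getYearRangeTickValues(y0, y1, minStepYear):
--     # Closed-form step per year: p = largest power of ten (capped at 1000)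
--     # dividing y, computed from trailing zeros; keep y iff p >= minStepYear.
--     out = []
--     for y in range(y0, y1):
--         if y == 0:
--             p = 1000
--         else:
--             a = abs(y)
--             p = 1
--             while p < 1000 and a % 10 == 0:
--                 a //= 10
--                 p *= 10
--         if p >= minStepYear:
--             out.append((p, y))
--     return out
-- ===== Notes on version B (the rewrite author's own statement) =====
-- stated objective: simpler
-- what changed: The descending divisor list (1000,100,10,1) and the inner scan-with-break over it are replaced by a direct trailing-zeros computation of the largest power of ten (capped at 1000) dividing each year, appended iff it reaches minStepYear.
import Mathlib
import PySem

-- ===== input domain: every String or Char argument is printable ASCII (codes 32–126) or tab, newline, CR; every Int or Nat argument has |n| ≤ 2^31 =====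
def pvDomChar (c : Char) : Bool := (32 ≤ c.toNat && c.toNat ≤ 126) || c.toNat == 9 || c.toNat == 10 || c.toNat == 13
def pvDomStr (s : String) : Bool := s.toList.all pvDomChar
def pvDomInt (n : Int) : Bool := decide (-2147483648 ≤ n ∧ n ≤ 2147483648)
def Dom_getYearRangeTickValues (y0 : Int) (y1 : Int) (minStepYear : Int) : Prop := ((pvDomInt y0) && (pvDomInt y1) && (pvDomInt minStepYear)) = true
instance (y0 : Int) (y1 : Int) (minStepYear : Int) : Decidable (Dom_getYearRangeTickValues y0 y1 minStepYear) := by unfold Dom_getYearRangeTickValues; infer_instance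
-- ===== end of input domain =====

-- B replaces A's per-year scan over a precomputed divisor list by a closed-form
-- trailing-zero computation of the largest power of ten (≤ 1000) dividing each
-- year; objective: simpler.

-- ===== PORT A =====
-- A's first loop: build numList, breaking at the first n < minStepYear
def pvNumList (m : Int) : List Int → List Int
  | [] => []
  | n :: rest => if n < m then [] else n :: pvNumList m rest

-- A's inner loop: 'for n in numList: if y % n == 0: data.append((n, y)); break'
def pvInner (y : Int) : List Int → List (Int × Int)
  | [] => []
  | n :: rest => if PySem.Int.mod y n = 0 then [(n, y)] else pvInner y rest

def getYearRangeTickValues (y0 : Int) (y1 : Int) (minStepYear : Int) : List (Int × Int) :=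
  let numList := pvNumList minStepYear [1000, 100, 10, 1]
  (PySem.List.pyRange y0 y1 1).foldl (fun data y => data ++ pvInner y numList) []

-- ===== PORT B =====
-- Source B's while loop: 'while p < 1000 and a % 10 == 0: a //= 10; p *= 10';
-- the 0 < a guard is for Lean termination only (in Source B a = abs(y) > 0 always)
def pvTrail (a : Nat) (p : Int) : Int :=
  if h : 0 < a ∧ p < 1000 ∧ a % 10 = 0 then pvTrail (a / 10) (p * 10) else p
  termination_by a
  decreasing_by exact Nat.div_lt_self h.1 (by norm_num)

def getYearRangeTickValues_alt (y0 : Int) (y1 : Int) (minStepYear : Int) : List (Int × Int) :=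
  (PySem.List.pyRange y0 y1 1).foldl (fun out y =>
    let p : Int := if y = 0 then 1000 else pvTrail y.natAbs 1
    if minStepYear ≤ p then out ++ [(p, y)] else out) []

-- ===== PRECONDITION & SPEC =====
def Spec_getYearRangeTickValues (y0 : Int) (y1 : Int) (minStepYear : Int) (out : List (Int × Int)) : Prop := out = getYearRangeTickValues_alt y0 y1 minStepYear
instance (y0 : Int) (y1 : Int) (minStepYear : Int) (out : List (Int × Int)) : Decidable (Spec_getYearRangeTickValues y0 y1 minStepYear out) := by unfold Spec_getYearRangeTickValues; infer_instance

-- ===== CLAIM (what is proved, stated in full; the proofs are below) =====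
def Claim_equal_getYearRangeTickValues : Prop := ∀ (y0 : Int) (y1 : Int) (minStepYear : Int), Dom_getYearRangeTickValues y0 y1 minStepYear → Spec_getYearRangeTickValues y0 y1 minStepYear (getYearRangeTickValues y0 y1 minStepYear)

-- ===== LEMMAS AND PROOFS =====

-- pvTrail computes the largest power of ten (≤ 1000) dividing a
lemma pvTrail_eq (a : Nat) (h : 0 < a) :
    pvTrail a 1 = if 1000 ∣ a then 1000 else if 100 ∣ a then 100 else if 10 ∣ a then 10 else 1 := by
  rw [pvTrail]
  rw [pvTrail]
  rw [pvTrail]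
  rw [pvTrail]
  split_ifs <;> omega

-- lifted to Int: B's per-year power of ten, for y ≠ 0
lemma pvPow_eq (y : Int) (h : y ≠ 0) :
    (pvTrail y.natAbs 1) =
      if (1000:Int) ∣ y then 1000 else if (100:Int) ∣ y then 100 else if (10:Int) ∣ y then 10 else 1 := by
  have ha : 0 < y.natAbs := Int.natAbs_pos.mpr h
  rw [pvTrail_eq _ ha]
  have e1000 : (1000 ∣ y.natAbs) ↔ ((1000:Int) ∣ y) := by
    rw [← Int.natAbs_dvd_natAbs]; norm_num
  have e100 : (100 ∣ y.natAbs) ↔ ((100:Int) ∣ y) := by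
    rw [← Int.natAbs_dvd_natAbs]; norm_num
  have e10 : (10 ∣ y.natAbs) ↔ ((10:Int) ∣ y) := by
    rw [← Int.natAbs_dvd_natAbs]; norm_num
  simp only [e1000, e100, e10]

-- A's inner scan, characterised through any q describing y's divisibility pattern
lemma inner_eq (m y q : Int)
    (hq : q = 1000 ∨ q = 100 ∨ q = 10 ∨ q = 1)
    (d1000 : ((1000:Int) ∣ y) ↔ 1000 ≤ q) (d100 : ((100:Int) ∣ y) ↔ 100 ≤ q)
    (d10 : ((10:Int) ∣ y) ↔ 10 ≤ q) :
    pvInner y (pvNumList m [1000, 100, 10, 1]) = (if m ≤ q then [(q, y)] else []) := by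
  have h1000 := PySem.Int.mod_eq_zero_iff_dvd y 1000
  have h100 := PySem.Int.mod_eq_zero_iff_dvd y 100
  have h10 := PySem.Int.mod_eq_zero_iff_dvd y 10
  have h1 : PySem.Int.mod y 1 = 0 := by rw [PySem.Int.mod_eq_zero_iff_dvd]; exact one_dvd y
  simp only [pvNumList]
  rcases hq with rfl | rfl | rfl | rfl <;>
    split_ifs <;> simp_all [pvInner] <;> omega

-- the per-year contributions of the two programs coincide
lemma step_eq (m y : Int) :
    pvInner y (pvNumList m [1000, 100, 10, 1]) =
      (if m ≤ (if y = 0 then (1000:Int) else pvTrail y.natAbs 1)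
       then [((if y = 0 then (1000:Int) else pvTrail y.natAbs 1), y)] else []) := by
  have hq' : (if y = 0 then (1000:Int) else pvTrail y.natAbs 1) =
      if (1000:Int) ∣ y then 1000 else if (100:Int) ∣ y then 100 else if (10:Int) ∣ y then 10 else 1 := by
    by_cases hy : y = 0
    · simp [hy]
    · rw [if_neg hy, pvPow_eq y hy]
  rw [hq']
  have t1 : (100:Int) ∣ 1000 := by norm_num
  have t2 : (10:Int) ∣ 1000 := by norm_num
  have t3 : (10:Int) ∣ 100 := by norm_num
  apply inner_eq
  · split_ifs <;> simp
  · split_ifs <;> simp_all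
  · by_cases a : (1000:Int) ∣ y
    · have : (100:Int) ∣ y := dvd_trans t1 a
      simp [a, this]
    · by_cases b : (100:Int) ∣ y
      · simp [a, b]
      · by_cases c : (10:Int) ∣ y <;> simp [a, b, c]
  · by_cases a : (1000:Int) ∣ y
    · have : (10:Int) ∣ y := dvd_trans t2 a
      simp [a, this]
    · by_cases b : (100:Int) ∣ y
      · have : (10:Int) ∣ y := dvd_trans t3 b
        simp [a, b, this]
      · by_cases c : (10:Int) ∣ y <;> simp [a, b, c]

-- ===== VERDICT (by name: the statement is the Claim_ definition above) =====
theorem getYearRangeTickValues_spec : Claim_equal_getYearRangeTickValues := by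
  intro y0 y1 m _
  unfold Spec_getYearRangeTickValues getYearRangeTickValues getYearRangeTickValues_alt
  have hf : (fun (data : List (Int × Int)) (y : Int) =>
        data ++ pvInner y (pvNumList m [1000, 100, 10, 1])) =
      (fun (out : List (Int × Int)) (y : Int) =>
        let p : Int := if y = 0 then 1000 else pvTrail y.natAbs 1
        if m ≤ p then out ++ [(p, y)] else out) := by
    funext data y
    show _ = (if m ≤ (if y = 0 then (1000:Int) else pvTrail y.natAbs 1)
       then data ++ [((if y = 0 then (1000:Int) else pvTrail y.natAbs 1), y)] else data)
    rw [step_eq]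
    split_ifs <;> simp
  show List.foldl _ [] _ = _
  rw [hf]
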